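-- pv_equiv track=rewrite | github.com/echomodel/mcp-app | mcp_app/storage_check.py | _matches_required
-- ===== SOURCE A (Python) =====
-- def _matches_required(actual: str, required: str) -> bool:
--     """Match REQUIRED_FS_TYPE: comma-separated list, prefix-friendly.
--
--     "fuse" matches "fuse.gcsfuse" (prefix on a "." boundary).
--     "fuse,nfs" matches either. Whitespace around commas is ignored.
--     Empty entries are skipped.
--     """
--     for piece in required.split(","):
--         piece = piece.strip()
--         if not piece:
--             continue
--         if actual == piece or actual.startswith(piece + "."):
--             return True
--     return False
-- ===== SOURCE B (Python) =====
-- def _matches_required(actual: str, required: str) -> bool: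
--     # Set of stripped non-empty required tokens, then test actual's dot-boundary
--     # prefixes (plus actual itself) against it.
--     tokens = {p.strip() for p in required.split(",") if p.strip()}
--     candidates = [actual] + [actual[:i] for i, ch in enumerate(actual) if ch == "."]
--     return any(c in tokens for c in candidates)
-- ===== Notes on version B (the rewrite author's own statement) =====
-- stated objective: alternative
-- what changed: Instead of scanning the required tokens and testing actual.startswith(piece+'.') for each, B builds a set of stripped tokens once and checks whether actual or any of its dot-boundary prefixes is in that set.
import Mathlib
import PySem

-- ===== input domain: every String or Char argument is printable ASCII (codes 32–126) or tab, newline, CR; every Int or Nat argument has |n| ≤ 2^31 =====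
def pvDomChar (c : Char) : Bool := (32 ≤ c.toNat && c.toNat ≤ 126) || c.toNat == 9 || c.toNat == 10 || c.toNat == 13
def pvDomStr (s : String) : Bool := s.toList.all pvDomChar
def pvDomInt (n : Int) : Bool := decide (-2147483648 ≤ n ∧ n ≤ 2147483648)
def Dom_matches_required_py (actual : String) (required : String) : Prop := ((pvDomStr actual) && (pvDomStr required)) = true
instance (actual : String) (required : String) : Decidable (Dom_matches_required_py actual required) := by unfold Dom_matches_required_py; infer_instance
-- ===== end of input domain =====

-- B replaces A's per-token startswith scan by a token set probed with actual and its dot-boundary prefixes (alternative decomposition, same behaviour).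

-- ===== PORT A =====
-- required.split(",") (separator is nonempty, so split? is always some; getD only totalizes)
def pvPieces (required : String) : List String :=
  (PySem.Str.split? required ",").getD []

-- the for-loop over required.split(",") with continue / early return
def pvGoA (actual : String) : List String → Bool
  | [] => false
  | p :: rest =>
    let piece := PySem.Str.strip p
    if piece == "" then pvGoA actual rest
    else if actual == piece || PySem.Str.startswith actual (piece ++ ".") then true
    else pvGoA actual rest

def matches_required_py (actual : String) (required : String) : Bool :=
  pvGoA actual (pvPieces required)

-- ===== PORT B =====
def matches_required_py_alt (actual : String) (required : String) : Bool :=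
  let tokens := PySem.Set.ofList
    (((pvPieces required).map PySem.Str.strip).filter (fun q => !(q == "")))
  -- [actual[:i] for i, ch in enumerate(actual) if ch == "."]  (enumerate over code points)
  let candidates := actual ::
    (((PySem.List.enumerate actual.toList 0).filter (fun p => p.2 == '.')).map
      (fun p => PySem.Str.slice actual none (some p.1)))
  candidates.any (fun c => PySem.Set.contains tokens c)

-- ===== PRECONDITION & SPEC =====
def Spec_matches_required_py (actual : String) (required : String) (out : Bool) : Prop := out = matches_required_py_alt actual required
instance (actual : String) (required : String) (out : Bool) : Decidable (Spec_matches_required_py actual required out) := by unfold Spec_matches_required_py; infer_instance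

-- ===== CLAIM (what is proved, stated in full; the proofs are below) =====
def Claim_equal_matches_required_py : Prop := ∀ (actual : String) (required : String), Dom_matches_required_py actual required → Spec_matches_required_py actual required (matches_required_py actual required)

-- ===== LEMMAS AND PROOFS =====

-- the per-piece test of A's loop, as a Boolean function
def pvFA (actual p : String) : Bool :=
  !(PySem.Str.strip p == "") &&
    (actual == PySem.Str.strip p || PySem.Str.startswith actual (PySem.Str.strip p ++ "."))

theorem pv_goA_eq_any (actual : String) (l : List String) :
    pvGoA actual l = l.any (pvFA actual) := by
  induction l with
  | nil => rfl
  | cons p rest ih =>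
    cases h0 : (PySem.Str.strip p == "") with
    | true => simp [pvGoA, pvFA, h0, ih]
    | false =>
      cases hm : (actual == PySem.Str.strip p ||
          PySem.Str.startswith actual (PySem.Str.strip p ++ ".")) <;>
        simp [pvGoA, pvFA, h0, ih, beq_eq_decide]

theorem pv_fA_iff (actual p : String) :
    pvFA actual p = true ↔ PySem.Str.strip p ≠ "" ∧
      (actual = PySem.Str.strip p ∨
        (PySem.Str.strip p).toList ++ ['.'] <+: actual.toList) := by
  unfold pvFA
  rw [Bool.and_eq_true, Bool.or_eq_true, PySem.Str.startswith_eq, PySem.Chars.startswith_iff]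
  simp

-- dot-boundary characterisation of "q ++ '.' is a prefix"
theorem pv_prefix_dot_iff (q a : List Char) :
    (q ++ ['.']) <+: a ↔ ∃ k, ∃ h : k < a.length, a[k] = '.' ∧ a.take k = q := by
  constructor
  · rintro ⟨t, ht⟩
    refine ⟨q.length, ?_, ?_, ?_⟩ <;> simp [← ht]
  · rintro ⟨k, hk, hdot, htake⟩
    refine ⟨a.drop (k + 1), ?_⟩
    calc q ++ ['.'] ++ a.drop (k + 1)
        = a.take k ++ a.drop k := by
          rw [List.drop_eq_getElem_cons hk, hdot, htake]; simp
      _ = a := List.take_append_drop k a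

theorem pv_slice_take (actual : String) (k : Nat) :
    PySem.Str.slice actual none (some (k : Int)) = String.ofList (actual.toList.take k) := by
  apply String.toList_inj.mp
  rw [PySem.Str.toList_slice, PySem.Chars.slice_eq_listSlice, PySem.List.slice_to_natCast]
  simp

-- membership in B's candidate list
theorem pv_mem_candidates (actual c : String) :
    c ∈ (((PySem.List.enumerate actual.toList 0).filter (fun p => p.2 == '.')).map
        (fun p => PySem.Str.slice actual none (some p.1))) ↔
    ∃ k, ∃ h : k < actual.toList.length,
        actual.toList[k] = '.' ∧ actual.toList.take k = c.toList := by
  simp only [List.mem_map, List.mem_filter, PySem.List.mem_enumerate_iff]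
  constructor
  · rintro ⟨⟨i, x⟩, ⟨⟨k, hk, hpe⟩, hdot⟩, hc⟩
    cases hpe
    refine ⟨k, hk, by simpa using hdot, ?_⟩
    have : ((0 : Int) + (k : Int)) = ((k : Nat) : Int) := by omega
    rw [← hc]
    simp only [this, pv_slice_take]
    simp
  · rintro ⟨k, hk, hdot, htake⟩
    refine ⟨((0 : Int) + k, actual.toList[k]), ⟨⟨k, hk, rfl⟩, by simp [hdot]⟩, ?_⟩
    have : ((0 : Int) + (k : Int)) = ((k : Nat) : Int) := by omega
    simp only [this, pv_slice_take, htake]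
    simp

theorem pv_alt_iff (actual required : String) :
    matches_required_py_alt actual required = true ↔
    ∃ c, (c = actual ∨ ∃ k, ∃ h : k < actual.toList.length,
            actual.toList[k] = '.' ∧ actual.toList.take k = c.toList) ∧
         c ∈ ((pvPieces required).map PySem.Str.strip).filter (fun q => !(q == "")) := by
  unfold matches_required_py_alt
  simp only [List.any_eq_true, List.mem_cons]
  constructor
  · rintro ⟨c, hc, hmem⟩
    rw [PySem.Set.contains_iff, PySem.Set.mem_ofList] at hmem
    rcases hc with hc | hc
    · exact ⟨c, Or.inl hc, hmem⟩
    · exact ⟨c, Or.inr ((pv_mem_candidates actual c).mp hc), hmem⟩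
  · rintro ⟨c, hc, hmem⟩
    refine ⟨c, ?_, ?_⟩
    · rcases hc with hc | hc
      · exact Or.inl hc
      · exact Or.inr ((pv_mem_candidates actual c).mpr hc)
    · rw [PySem.Set.contains_iff, PySem.Set.mem_ofList]; exact hmem

-- ===== VERDICT (by name: the statement is the Claim_ definition above) =====
theorem matches_required_py_spec : Claim_equal_matches_required_py := by
  intro actual required _
  unfold Spec_matches_required_py
  rw [Bool.eq_iff_iff]
  unfold matches_required_py
  rw [pv_goA_eq_any, pv_alt_iff, List.any_eq_true]
  constructor
  · rintro ⟨p, hp, hfa⟩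
    obtain ⟨hne, hmatch⟩ := (pv_fA_iff actual p).mp hfa
    refine ⟨PySem.Str.strip p, ?_, ?_⟩
    · rcases hmatch with h | h
      · exact Or.inl h.symm
      · exact Or.inr ((pv_prefix_dot_iff _ _).mp h)
    · simp only [List.mem_filter, List.mem_map]
      exact ⟨⟨p, hp, rfl⟩, by simpa using hne⟩
  · rintro ⟨c, hc, hmem⟩
    simp only [List.mem_filter, List.mem_map] at hmem
    obtain ⟨⟨p, hp, hps⟩, hne⟩ := hmem
    refine ⟨p, hp, (pv_fA_iff actual p).mpr ⟨by rw [hps]; simpa using hne, ?_⟩⟩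
    rw [hps]
    rcases hc with h | h
    · exact Or.inl h.symm
    · exact Or.inr ((pv_prefix_dot_iff _ _).mpr h)
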